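-- pv_equiv track=rewrite | github.com/hitergelei/tools | ss_util.py | list2numlist
-- ===== SOURCE A (Python) =====
-- def list2numlist(list_inp):
--     numlist = []
--     keys=dict()
--     i=0
--     for ele in list_inp:
--         if ele in keys:
--             numlist.append(keys[ele])
--         else:
--             keys[ele]=i
--             numlist.append(keys[ele])
--             i+=1
--     return numlist
-- ===== SOURCE B (Python) =====
-- def list2numlist(list_inp):
--     # Dict-free closed form: the label of ele is the number of distinct
--     # elements occurring strictly before ele's first occurrence.
--     return [len(set(list_inp[:list_inp.index(ele)])) for ele in list_inp]
-- ===== Notes on version B (the rewrite author's own statement) =====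
-- stated objective: alternative
-- what changed: A's single pass with a dict and a manual counter is replaced by a dict-free per-element closed form: each label is the number of distinct elements in the prefix before that element's first occurrence (len(set(prefix)) via list.index), trading O(n) time for a stateless formula.
import Mathlib
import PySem

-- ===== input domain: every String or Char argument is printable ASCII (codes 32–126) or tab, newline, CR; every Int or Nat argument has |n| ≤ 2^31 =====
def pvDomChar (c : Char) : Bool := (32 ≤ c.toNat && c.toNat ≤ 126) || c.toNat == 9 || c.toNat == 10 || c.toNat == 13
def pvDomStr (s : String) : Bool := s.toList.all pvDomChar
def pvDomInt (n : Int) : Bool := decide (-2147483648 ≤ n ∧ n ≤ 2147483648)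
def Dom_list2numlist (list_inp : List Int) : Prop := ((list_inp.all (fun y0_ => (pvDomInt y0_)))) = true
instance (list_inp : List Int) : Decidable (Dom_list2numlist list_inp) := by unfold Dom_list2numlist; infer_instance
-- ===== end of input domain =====

-- B replaces A's stateful dict-and-counter pass by a dict-free per-element closed form:
-- the label of ele is the number of distinct elements before ele's first occurrence.

-- ===== PORT A =====
-- A's loop body: state (numlist, keys, i); lookup-or-insert at each element.
def stepA (st : List Int × PySem.Dict Int Int × Int) (ele : Int) :
    List Int × PySem.Dict Int Int × Int :=
  let numlist := st.1
  let keys := st.2.1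
  let i := st.2.2
  if keys.contains ele then
    (numlist ++ [keys.getD ele 0], keys, i)
  else
    let keys' := keys.insert ele i
    (numlist ++ [keys'.getD ele 0], keys', i + 1)

def list2numlist (list_inp : List Int) : List Int :=
  (list_inp.foldl stepA ([], PySem.Dict.empty, 0)).1

-- ===== PORT B =====
-- B: [len(set(list_inp[:list_inp.index(ele)])) for ele in list_inp].
-- list_inp.index(ele) always succeeds in Python (ele comes from list_inp); ported as index? with default 0.
def list2numlist_alt (list_inp : List Int) : List Int :=
  list_inp.map (fun ele =>
    ((PySem.Set.ofList (PySem.List.slice list_inp none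
        (some (((PySem.List.index? list_inp ele).getD 0 : Nat) : Int)))).length : Int))

-- ===== PRECONDITION & SPEC =====
def Spec_list2numlist (list_inp : List Int) (out : List Int) : Prop := out = list2numlist_alt list_inp
instance (list_inp : List Int) (out : List Int) : Decidable (Spec_list2numlist list_inp out) := by unfold Spec_list2numlist; infer_instance

-- ===== CLAIM (what is proved, stated in full; the proofs are below) =====
def Claim_equal_list2numlist : Prop := ∀ (list_inp : List Int), Dom_list2numlist list_inp → Spec_list2numlist list_inp (list2numlist list_inp)

-- ===== LEMMAS AND PROOFS =====

-- An element already in s keeps its index when the set is extended by further adds.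
theorem idxOf_update_of_mem (l : List Int) : ∀ (s : List Int) (x : Int), x ∈ s →
    (PySem.Set.update s l).idxOf x = s.idxOf x := by
  induction l with
  | nil => intro s x hx; rfl
  | cons e rest ih =>
    intro s x hx
    show (PySem.Set.update (PySem.Set.add s e) rest).idxOf x = s.idxOf x
    by_cases he : e ∈ s
    · rw [PySem.Set.add_of_mem he]; exact ih s x hx
    · rw [PySem.Set.add_of_not_mem he, ih _ x (List.mem_append_left _ hx),
        List.idxOf_append_of_mem hx]

-- B's closed form: the index of e in the ordered set of l's elements is the number of
-- distinct elements (on top of s) in the prefix of l before e's first occurrence.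
theorem idxOf_update_eq_len_take (l : List Int) : ∀ (s : List Int) (e : Int), e ∈ l → e ∉ s →
    (PySem.Set.update s l).idxOf e = (PySem.Set.update s (l.take (l.idxOf e))).length := by
  induction l with
  | nil => intro s e he _; exact absurd he (List.not_mem_nil)
  | cons x rest ih =>
    intro s e he hs
    by_cases hx : e = x
    · subst hx
      show (PySem.Set.update (PySem.Set.add s e) rest).idxOf e = _
      rw [PySem.Set.add_of_not_mem hs, List.idxOf_cons_self, List.take_zero,
        idxOf_update_of_mem rest (s ++ [e]) e (by simp),
        List.idxOf_append_of_notMem hs]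
      show s.length + [e].idxOf e = (PySem.Set.update s []).length
      simp [PySem.Set.update]
    · have hxr : e ∈ rest := by
        rcases List.mem_cons.mp he with h | h
        · exact absurd h hx
        · exact h
      have hs' : e ∉ PySem.Set.add s x := by
        by_cases hxs : x ∈ s
        · rw [PySem.Set.add_of_mem hxs]; exact hs
        · rw [PySem.Set.add_of_not_mem hxs]
          intro hmem
          rcases List.mem_append.mp hmem with h | h
          · exact hs h
          · simp at h; exact hx h
      have hidx : (x :: rest).idxOf e = rest.idxOf e + 1 :=
        List.idxOf_cons_ne rest (fun h => hx h.symm)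
      rw [hidx]
      show (PySem.Set.update (PySem.Set.add s x) rest).idxOf e = _
      rw [ih (PySem.Set.add s x) e hxr hs', List.take_succ_cons]
      rfl

-- list.index on a member returns the first-occurrence index.
theorem idxOf?_eq_some_idxOf (l : List Int) (e : Int) (he : e ∈ l) :
    List.idxOf? e l = some (l.idxOf e) := by
  induction l with
  | nil => cases he
  | cons x rest ih =>
    by_cases hx : x = e
    · subst hx; simp [List.idxOf?_cons, List.idxOf_cons_self]
    · rw [List.idxOf?_cons]
      have hr : e ∈ rest := by
        rcases List.mem_cons.mp he with h | h
        · exact absurd h.symm hx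
        · exact h
      simp [hx, ih hr, List.idxOf_cons_ne _ hx]

-- Lookup invariant for A's dict: it is the table of s (seen elements, first-occurrence order).
def InvA (s : List Int) (keys : PySem.Dict Int Int) : Prop :=
  (∀ x, keys.contains x = decide (x ∈ s)) ∧
  (∀ x, x ∈ s → keys.getD x 0 = (s.idxOf x : Int))

-- A's loop, generalized over the already-seen set s.
theorem foldA (l : List Int) : ∀ (s : List Int) (acc : List Int) (keys : PySem.Dict Int Int),
    s.Nodup → InvA s keys →
    (l.foldl stepA (acc, keys, (s.length : Int))).1 =
      acc ++ l.map (fun e => ((PySem.Set.update s l).idxOf e : Int)) := by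
  induction l with
  | nil => intro s acc keys _ _; simp
  | cons e rest ih =>
    intro s acc keys hnd hinv
    simp only [List.foldl_cons, List.map_cons, stepA, hinv.1 e]
    by_cases he : e ∈ s
    · simp only [he, decide_true, if_true]
      have hupd : PySem.Set.update s (e :: rest) = PySem.Set.update s rest := by
        show PySem.Set.update (PySem.Set.add s e) rest = _
        rw [PySem.Set.add_of_mem he]
      rw [ih s (acc ++ [keys.getD e 0]) keys hnd hinv, hinv.2 e he, hupd,
        idxOf_update_of_mem rest s e he]
      simp
    · simp only [he, decide_false, Bool.false_eq_true, if_false]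
      have hupd : PySem.Set.update s (e :: rest) = PySem.Set.update (s ++ [e]) rest := by
        show PySem.Set.update (PySem.Set.add s e) rest = _
        rw [PySem.Set.add_of_not_mem he]
      have hnd' : (s ++ [e]).Nodup := by
        refine List.Nodup.append hnd (List.nodup_singleton e) ?_
        intro a ha hb
        simp only [List.mem_singleton] at hb
        exact he (hb ▸ ha)
      have hinv' : InvA (s ++ [e]) (keys.insert e (s.length : Int)) := by
        constructor
        · intro x
          rw [PySem.Dict.contains_insert]
          by_cases hx : x = e
          · simp [hx]
          · simp [hx, hinv.1 x, List.mem_append]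
        · intro x hx
          by_cases hx' : x = e
          · subst hx'
            rw [PySem.Dict.getD_insert_self, List.idxOf_append_of_notMem he]
            simp
          · have hxs : x ∈ s := by
              rcases List.mem_append.mp hx with h | h
              · exact h
              · simp at h; exact absurd h hx'
            rw [PySem.Dict.getD_insert_of_ne keys _ 0 hx', hinv.2 x hxs,
              List.idxOf_append_of_mem hxs]
      have hlen : ((s ++ [e]).length : Int) = (s.length : Int) + 1 := by simp
      rw [show (s.length : Int) + 1 = ((s ++ [e]).length : Int) from hlen.symm,
        ih (s ++ [e]) _ _ hnd' hinv', PySem.Dict.getD_insert_self, hupd,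
        idxOf_update_of_mem rest (s ++ [e]) e (by simp), List.idxOf_append_of_notMem he]
      simp

-- ===== VERDICT (by name: the statement is the Claim_ definition above) =====
theorem list2numlist_spec : Claim_equal_list2numlist := by
  intro list_inp _
  show list2numlist list_inp = list2numlist_alt list_inp
  unfold list2numlist list2numlist_alt
  have hA := foldA list_inp [] [] PySem.Dict.empty List.nodup_nil
    ⟨fun x => by simp [PySem.Dict.contains_empty], fun x hx => absurd hx (List.not_mem_nil)⟩
  simp only [List.length_nil, Int.natCast_zero] at hA
  rw [hA]
  simp only [List.nil_append]
  apply List.map_congr_left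
  intro e he
  have hidx : PySem.List.index? list_inp e = some (list_inp.idxOf e) := by
    rw [PySem.List.index?_eq_idxOf?]
    exact idxOf?_eq_some_idxOf list_inp e he
  rw [hidx]
  simp only [Option.getD_some]
  rw [PySem.List.slice_to_natCast]
  have := idxOf_update_eq_len_take list_inp [] e he (List.not_mem_nil)
  rw [PySem.Set.ofList_eq_foldl]
  exact congrArg Int.ofNat this
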